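-- pv_equiv track=rewrite | github.com/sh-seunghee/Python_Course | Homework/hw05.py | transient
-- ===== SOURCE A (Python) =====
-- def transient(data_series_MV101):
--
--     trans_time = 0
--
--     closing_begin = False
--     closing_begin_time = 0
--
--     for i in range(len(data_series_MV101)):
--
--         if (data_series_MV101[i] == 0):
--
--             if closing_begin == False:
--                 closing_begin = True
--                 closing_begin_time = i
--
--             trans_time += 1
--
--     return trans_time, closing_begin_time
-- ===== SOURCE B (Python) =====
-- def transient(data_series_MV101):
--     # Back-to-front pass: walk the list in reverse keeping (zeros seen so far,
--     # distance from the current position to the nearest zero at or after it).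
--     trans_time = 0
--     closing_begin_time = 0
--     for x in reversed(data_series_MV101):
--         if x == 0:
--             trans_time += 1
--             closing_begin_time = 0
--         elif trans_time:
--             closing_begin_time += 1
--     return trans_time, closing_begin_time
-- ===== Notes on version B (the rewrite author's own statement) =====
-- stated objective: alternative
-- what changed: Builds the answer back-to-front: a reverse-order pass maintains the zero count and the offset of the nearest zero at-or-after the current position (incremented while walking left), instead of A's forward pass with a first-zero-seen flag and saved index.
import Mathlib
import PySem

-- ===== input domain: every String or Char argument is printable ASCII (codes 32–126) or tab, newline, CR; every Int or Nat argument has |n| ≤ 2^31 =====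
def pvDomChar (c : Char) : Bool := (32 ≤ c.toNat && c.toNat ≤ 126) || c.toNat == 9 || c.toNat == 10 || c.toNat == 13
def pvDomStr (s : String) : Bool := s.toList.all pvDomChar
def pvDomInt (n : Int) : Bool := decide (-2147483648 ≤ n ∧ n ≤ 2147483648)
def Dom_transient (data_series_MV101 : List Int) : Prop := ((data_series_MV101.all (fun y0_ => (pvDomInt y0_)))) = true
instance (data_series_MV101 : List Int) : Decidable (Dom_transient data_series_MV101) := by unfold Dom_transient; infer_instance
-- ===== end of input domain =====

-- B replaces A's forward pass (first-zero flag + saved index) with a reverse-order pass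
-- maintaining the zero count and the offset to the nearest zero at-or-after the position;
-- objective: alternative (different traversal), same cost.

-- ===== PORT A =====
-- A's loop body: one step per element, state = (trans_time, closing_begin, closing_begin_time, i)
def transientStep (st : Int × Bool × Int × Int) (x : Int) : Int × Bool × Int × Int :=
  if x = 0 then
    if st.2.1 = false then (st.1 + 1, true, st.2.2.2, st.2.2.2 + 1)
    else (st.1 + 1, st.2.1, st.2.2.1, st.2.2.2 + 1)
  else (st.1, st.2.1, st.2.2.1, st.2.2.2 + 1)

def transient (data_series_MV101 : List Int) : Int × Int :=
  let st := data_series_MV101.foldl transientStep (0, false, 0, 0)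
  (st.1, st.2.2.1)

-- ===== PORT B =====
-- B's loop body over the reversed list: state = (trans_time, closing_begin_time)
def transientAltStep (st : Int × Int) (x : Int) : Int × Int :=
  if x = 0 then (st.1 + 1, 0)
  else if st.1 ≠ 0 then (st.1, st.2 + 1)
  else st

def transient_alt (data_series_MV101 : List Int) : Int × Int :=
  data_series_MV101.reverse.foldl transientAltStep (0, 0)

-- ===== PRECONDITION & SPEC =====
def Spec_transient (data_series_MV101 : List Int) (out : Int × Int) : Prop := out = transient_alt data_series_MV101
instance (data_series_MV101 : List Int) (out : Int × Int) : Decidable (Spec_transient data_series_MV101 out) := by unfold Spec_transient; infer_instance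

-- ===== CLAIM =====
def Claim_equal_transient : Prop := ∀ (data_series_MV101 : List Int), Dom_transient data_series_MV101 → Spec_transient data_series_MV101 (transient data_series_MV101)

-- ===== LEMMAS AND PROOFS =====
-- Characterisation shared by both ports: (count of zeros, index of first zero or 0).

theorem foldl_step_true (xs : List Int) (tr cbt i : Int) :
    xs.foldl transientStep (tr, true, cbt, i)
      = (tr + (xs.count 0 : Int), true, cbt, i + xs.length) := by
  induction xs generalizing tr i with
  | nil => simp
  | cons x xs ih =>
      by_cases hx : x = 0
      · simp only [List.foldl_cons, transientStep, if_pos hx, if_neg (by simp : ¬ (true = false))]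
        rw [ih]
        simp [hx, List.count_cons]
        push_cast; constructor <;> ring
      · simp only [List.foldl_cons, transientStep, if_neg hx]
        rw [ih]
        simp [List.count_cons, hx]
        ring

theorem foldl_step_false (xs : List Int) (tr i : Int) :
    xs.foldl transientStep (tr, false, 0, i)
      = match PySem.List.index? xs 0 with
        | none => (tr, false, 0, i + xs.length)
        | some k => (tr + (xs.count 0 : Int), true, i + k, i + xs.length) := by
  induction xs generalizing tr i with
  | nil => simp
  | cons x xs ih =>
      by_cases hx : x = 0
      · subst hx
        rw [PySem.List.index?_cons_self]
        rw [List.foldl_cons]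
        simp only [transientStep, if_pos rfl]
        simp only [show ((0:Int) = 0) = True from by simp, if_true]
        rw [show (((tr:Int) + 1, true, i, i + 1) : Int × Bool × Int × Int)
              = (tr + 1, true, i, i + 1) from rfl]
        rw [foldl_step_true]
        simp [List.count_cons]
        constructor
        · push_cast; ring
        · ring
      · have hidx : PySem.List.index? (x :: xs) 0 = (PySem.List.index? xs 0).map (· + 1) :=
          PySem.List.index?_cons_of_ne xs hx
        rw [List.foldl_cons]
        simp only [transientStep, if_neg hx]
        rw [ih, hidx]
        cases h : PySem.List.index? xs 0 with
        | none => simp [List.count_cons, hx]; ring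
        | some k =>
            simp [List.count_cons, hx]
            constructor
            · push_cast; ring
            · ring

theorem alt_char (xs : List Int) :
    transient_alt xs
      = match PySem.List.index? xs 0 with
        | none => (0, 0)
        | some k => ((xs.count 0 : Int), (k : Int)) := by
  unfold transient_alt
  rw [List.foldl_reverse]
  induction xs with
  | nil => simp
  | cons x xs ih =>
      rw [List.foldr_cons]
      by_cases hx : x = 0
      · subst hx
        rw [PySem.List.index?_cons_self, ih]
        cases h : PySem.List.index? xs 0 with
        | none =>
            have hmem : (0 : Int) ∉ xs := (PySem.List.index?_eq_none_iff xs 0).mp h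
            have hc : xs.count 0 = 0 := List.count_eq_zero.mpr hmem
            simp [transientAltStep, List.count_cons, hc]
        | some k =>
            simp [transientAltStep, List.count_cons]
      · have hidx : PySem.List.index? (x :: xs) 0 = (PySem.List.index? xs 0).map (· + 1) :=
          PySem.List.index?_cons_of_ne xs hx
        rw [hidx, ih]
        cases h : PySem.List.index? xs 0 with
        | none => simp [transientAltStep, hx]
        | some k =>
            have hmem : (0 : Int) ∈ xs := (PySem.List.index?_isSome_iff xs 0).mp (by rw [h]; rfl)
            have hc : xs.count 0 ≠ 0 := by simpa [List.count_eq_zero] using hmem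
            have hc' : (xs.count 0 : Int) ≠ 0 := by exact_mod_cast hc
            simp [transientAltStep, hx, hc, List.count_cons]

-- ===== VERDICT =====
theorem transient_spec : Claim_equal_transient := by
  intro xs _
  show transient xs = transient_alt xs
  unfold transient
  rw [foldl_step_false, alt_char]
  cases h : PySem.List.index? xs 0 <;> simp
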